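-- pv_equiv track=rewrite | github.com/pypi-data/pypi-mirror-188 | packages/catchword/catchword-0.1.1.tar.gz/catchword-0.1.1/catchword/handler.py | extract_word
-- ===== SOURCE A (Python) =====
-- def extract_word(source_text_list: list, num_words: int = 3) -> list:
--     """Extracts words from "Source Text"
--
--     It extracts words embedded in symbols, numbers, and spaces from the line.
--     This function is implemented to extract only "a" - "z" (lowercase) characters.
--     If there is a word in the sentence "Figure" then this function will extract only "igure".
--
--     If we're going to extract both lower and upper cases then we need to think about
--     case sensitivity in our function.
--     Also, we need to think about how we will handle the Unicode characters such as "한글".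
--
--     Args:
--         source_text_list: A list of lines
--         num_words: A number of words in the single-line
--
--     Returns:
--         A 2D list including extracted words
--
--     """
--
--     word_list = []
--
--     for source_text in source_text_list:
--         tmp = [""]
--         for character in source_text:
--             if ord("a") <= ord(character) <= ord("z"):
--                 tmp[-1] += character
--             elif tmp[-1]:
--                 tmp.append("")
--
--         if not tmp[-1]:
--             tmp.pop()
--
--         if len(tmp) == num_words:
--             word_list.append(tmp)
--
--     return word_list
-- ===== SOURCE B (Python) =====
-- def words_of(s):
--     """Maximal runs of lowercase a-z letters in s, via a two-pointer scan."""
--     words = []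
--     i, n = 0, len(s)
--     while i < n:
--         if 'a' <= s[i] <= 'z':
--             j = i
--             while j < n and 'a' <= s[j] <= 'z':
--                 j += 1
--             words.append(s[i:j])
--             i = j
--         else:
--             i += 1
--     return words
--
--
-- def extract_word(source_text_list: list, num_words: int = 3) -> list:
--     return [w for w in map(words_of, source_text_list) if len(w) == num_words]
-- ===== Notes on version B (the rewrite author's own statement) =====
-- stated objective: simpler
-- what changed: replaces the per-character state machine with trailing-empty-string bookkeeping (sentinel '' slot, append/pop) by a two-pointer run scanner that emits each maximal lowercase run as a slice, plus a comprehension for the length filter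
import Mathlib
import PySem

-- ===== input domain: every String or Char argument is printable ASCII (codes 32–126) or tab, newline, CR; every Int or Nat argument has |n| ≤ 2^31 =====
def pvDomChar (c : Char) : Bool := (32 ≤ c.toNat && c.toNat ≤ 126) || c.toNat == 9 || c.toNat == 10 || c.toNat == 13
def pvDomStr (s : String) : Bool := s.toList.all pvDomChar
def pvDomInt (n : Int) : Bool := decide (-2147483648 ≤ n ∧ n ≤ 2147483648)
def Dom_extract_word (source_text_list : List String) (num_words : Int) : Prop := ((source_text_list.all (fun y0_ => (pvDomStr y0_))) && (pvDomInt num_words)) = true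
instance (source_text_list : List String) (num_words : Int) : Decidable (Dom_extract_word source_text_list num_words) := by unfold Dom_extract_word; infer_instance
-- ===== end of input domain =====

-- B replaces A's per-character state machine (sentinel "" slot, append/pop bookkeeping)
-- by a two-pointer run scanner emitting maximal lowercase runs, plus a filter; simpler.
-- Strings are handled as List Char (the PySem representation) in both ports.

-- ===== PORT A =====
-- ord("a") <= ord(character) <= ord("z")
def pvLow (c : Char) : Bool := 97 ≤ c.toNat && c.toNat ≤ 122

-- the inner per-character step on tmp (tmp[-1] += character / tmp.append(""))
def pvAStep (tmp : List (List Char)) (c : Char) : List (List Char) :=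
  if pvLow c then tmp.dropLast ++ [tmp.getLastD [] ++ [c]]
  else if tmp.getLastD [] ≠ [] then tmp ++ [[]]
  else tmp

-- tmp = [""]; for character in source_text: …; if not tmp[-1]: tmp.pop()
def pvALine (s : List Char) : List (List Char) :=
  let t := s.foldl pvAStep [[]]
  if t.getLastD [] = [] then t.dropLast else t

def extract_word (source_text_list : List String) (num_words : Int) : List (List String) :=
  source_text_list.foldl
    (fun word_list source_text =>
      let tmp := pvALine source_text.toList
      if (tmp.length : Int) = num_words then word_list ++ [tmp.map String.mk] else word_list)
    []

-- ===== PORT B =====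
-- the inner while loop: the maximal lowercase run at the front, and the rest
def pvTakeRun : List Char → List Char × List Char
  | [] => ([], [])
  | c :: cs => if pvLow c then ((c :: (pvTakeRun cs).1), (pvTakeRun cs).2) else ([], c :: cs)

theorem pvTakeRun_snd_le (cs : List Char) : (pvTakeRun cs).2.length ≤ cs.length := by
  induction cs with
  | nil => simp [pvTakeRun]
  | cons c cs ih =>
    simp only [pvTakeRun]
    split
    · exact Nat.le_succ_of_le ih
    · simp

-- the outer while loop of words_of
def pvWordsOfC : List Char → List (List Char)
  | [] => []
  | c :: cs =>
    if pvLow c then (c :: (pvTakeRun cs).1) :: pvWordsOfC (pvTakeRun cs).2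
    else pvWordsOfC cs
termination_by cs => cs.length
decreasing_by
  · exact Nat.lt_succ_of_le (pvTakeRun_snd_le cs)
  · simp

def extract_word_alt (source_text_list : List String) (num_words : Int) : List (List String) :=
  (source_text_list.map (fun s => (pvWordsOfC s.toList).map String.mk)).filter
    (fun w => decide ((w.length : Int) = num_words))

-- ===== PRECONDITION & SPEC =====
def Spec_extract_word (source_text_list : List String) (num_words : Int) (out : List (List String)) : Prop := out = extract_word_alt source_text_list num_words
instance (source_text_list : List String) (num_words : Int) (out : List (List String)) : Decidable (Spec_extract_word source_text_list num_words out) := by unfold Spec_extract_word; infer_instance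

-- ===== CLAIM (what is proved, stated in full; the proofs are below) =====
def Claim_equal_extract_word : Prop := ∀ (source_text_list : List String) (num_words : Int), Dom_extract_word source_text_list num_words → Spec_extract_word source_text_list num_words (extract_word source_text_list num_words)

-- ===== LEMMAS AND PROOFS =====

-- A's state machine, seeded with partial word `cur`, as a recursion over the chars
def pvWordsAux (cur : List Char) : List Char → List (List Char)
  | [] => if cur = [] then [] else [cur]
  | c :: cs =>
    if pvLow c then pvWordsAux (cur ++ [c]) cs
    else if cur = [] then pvWordsAux [] cs
    else cur :: pvWordsAux [] cs

theorem pvALine_fold (cs : List Char) : ∀ (ws : List (List Char)) (cur : List Char),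
    (let t := cs.foldl pvAStep (ws ++ [cur])
     if t.getLastD [] = [] then t.dropLast else t) = ws ++ pvWordsAux cur cs := by
  induction cs with
  | nil =>
    intro ws cur
    simp only [List.foldl_nil, pvWordsAux]
    by_cases h : cur = [] <;> simp [h]
  | cons c cs ih =>
    intro ws cur
    simp only [List.foldl_cons, pvWordsAux]
    by_cases hl : pvLow c
    · have hstep : pvAStep (ws ++ [cur]) c = ws ++ [cur ++ [c]] := by
        simp [pvAStep, hl]
      rw [hstep, ih ws (cur ++ [c])]
      simp [hl]
    · by_cases hc : cur = []
      · have hstep : pvAStep (ws ++ [cur]) c = ws ++ [cur] := by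
          simp [pvAStep, hl, hc]
        rw [hstep, ih ws cur]
        simp [hl, hc]
      · have hstep : pvAStep (ws ++ [cur]) c = (ws ++ [cur]) ++ [[]] := by
          simp [pvAStep, hl, hc]
        rw [hstep]
        have := ih (ws ++ [cur]) []
        simp only [List.append_assoc] at this ⊢
        rw [this]
        simp [hl, hc]

theorem pvWordsAux_eq (cs : List Char) : ∀ cur : List Char,
    pvWordsAux cur cs =
      if cur = [] then pvWordsOfC cs
      else (cur ++ (pvTakeRun cs).1) :: pvWordsOfC (pvTakeRun cs).2 := by
  induction cs with
  | nil =>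
    intro cur
    by_cases h : cur = [] <;> simp [pvWordsAux, pvWordsOfC, pvTakeRun, h]
  | cons c cs ih =>
    intro cur
    by_cases hl : pvLow c
    · rw [show pvWordsAux cur (c :: cs) = pvWordsAux (cur ++ [c]) cs by simp [pvWordsAux, hl]]
      rw [ih (cur ++ [c])]
      have hne : cur ++ [c] ≠ [] := by simp
      rw [if_neg hne]
      by_cases hc : cur = []
      · simp [hc, pvWordsOfC, pvTakeRun, hl]
      · simp [hc, pvTakeRun, hl]
    · rw [show pvWordsAux cur (c :: cs) =
          if cur = [] then pvWordsAux [] cs else cur :: pvWordsAux [] cs by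
        simp [pvWordsAux, hl]]
      have h0 := ih []
      simp only [if_pos rfl] at h0
      by_cases hc : cur = []
      · simp [hc, h0, pvWordsOfC, hl]
      · simp [hc, h0, pvWordsOfC, pvTakeRun, hl]

theorem pvALine_eq (s : List Char) : pvALine s = pvWordsOfC s := by
  have := pvALine_fold s [] []
  simpa [pvALine, pvWordsAux_eq] using this

theorem pv_fold_filter (n : Int) (f : String → List (List Char)) (lines : List String) :
    ∀ acc : List (List String),
      lines.foldl
        (fun word_list s =>
          let tmp := f s
          if (tmp.length : Int) = n then word_list ++ [tmp.map String.mk] else word_list)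
        acc
      = acc ++ ((lines.map (fun s => (f s).map String.mk)).filter
          (fun w => decide ((w.length : Int) = n))) := by
  induction lines with
  | nil => intro acc; simp
  | cons s rest ih =>
    intro acc
    simp only [List.foldl_cons, List.map_cons, List.filter_cons]
    by_cases h : ((f s).length : Int) = n
    · rw [if_pos h, ih]
      simp [h]
    · rw [if_neg h, ih]
      simp [h]

-- ===== VERDICT (by name: the statement is the Claim_ definition above) =====
theorem extract_word_spec : Claim_equal_extract_word := by
  intro lines n _
  unfold Spec_extract_word extract_word extract_word_alt
  have := pv_fold_filter n (fun s => pvALine s.toList) lines []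
  simp only [List.nil_append] at this
  rw [this]
  exact congrArg _ (List.map_congr_left (fun s _ => by rw [pvALine_eq]))
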